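-- pv_equiv track=rewrite | github.com/dylayoun/AI_GRP_D3 | a2_path.py | path_BFS
-- ===== SOURCE A (Python) =====
-- from collections import deque
-- from typing import Callable, Dict, Iterable, List, Optional, Set, Tuple
--
-- Move = Tuple[int, str, str]  # (index, old_bit, new_bit)
--
-- State = str
--
-- def _ensureBinaryState(s: State) -> None:
--     """Validate that a state is a non-empty binary string"""
--     if not isinstance(s, str) or not s:
--         raise ValueError("State must be a non-empty string")
--     if any(c not in {'0', '1'} for c in s):
--         raise ValueError("State must be binary")
--
-- def _sameLength(a: State, b: State) -> None:
--     """Ensure two states have the same length."""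
--     if len(a) != len(b):
--         raise ValueError("States must be the same length")
--
-- def _neighbors(state: State, forbidden: Optional[Set[State]] = None) -> Iterable[Tuple[State, Move]]:
--     """Generate all 1-bit flip neighbors of state that are not forbidden"""
--     n = len(state)
--     for i in range(n):
--         flipped = '1' if state[i] == '0' else '0'
--         ns = state[:i] + flipped + state[i+1:]
--         if forbidden is not None and ns in forbidden:
--             continue
--         yield ns, (i, state[i], flipped)
--
-- def _reconstructMoves(parents: Dict[State, Tuple[Optional[State], Optional[Move]]], end: State) -> List[Move]:
--     """Reconstruct the path of moves from start to finish using parent pointers"""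
--     moves: List[Move] = []
--     cur = end
--     while True:
--         parent, move = parents[cur]
--         if parent is None:
--             break
--         moves.append(move)  # type: ignore
--         cur = parent
--     moves.reverse()
--     return moves
--
-- def path_BFS(start: State, end: State, forbidden: Optional[Set[State]] = None) -> Optional[List[Move]]:
--     """
--     Breadth-First Search: returns a shortest safe path as a list of moves.
--
--     BFS explores states level by level, guaranteeing the shortest path (in terms
--     of number of moves) when all moves have equal cost. It uses a queue to maintain
--     the frontier.
--
--     Time Complexity: O(2^n) where n is the length of the state
--     Space Complexity: O(2^n) for the visited set and queue
--
--     Args: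
--         start: Initial binary state
--         end: Goal binary state
--         forbidden: Set of states to avoid (hinger states)
--
--     Returns:
--         List of moves forming the shortest safe path, or None if no path exists
--     """
--     _ensureBinaryState(start)
--     _ensureBinaryState(end)
--     _sameLength(start, end)
--
--     if start == end:
--         return []
--
--     if forbidden is None:
--         forbidden = set()
--     if start in forbidden:
--         return None
--
--     q = deque([start])
--     parents: Dict[State, Tuple[Optional[State], Optional[Move]]] = {start: (None, None)}
--     visited: Set[State] = {start}
--
--     while q:
--         cur = q.popleft()
--         for ns, mv in _neighbors(cur, forbidden):
--             if ns in visited: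
--                 continue
--             parents[ns] = (cur, mv)
--             if ns == end:
--                 return _reconstructMoves(parents, end)
--             visited.add(ns)
--             q.append(ns)
--     return None
-- ===== SOURCE B (Python) =====
-- from collections import deque
-- from typing import List, Optional, Set, Tuple
--
-- Move = Tuple[int, str, str]  # (index, old_bit, new_bit)
--
--
-- def path_BFS(start: str, end: str, forbidden: Optional[Set[str]] = None) -> Optional[List[Move]]:
--     """BFS shortest bit-flip path, carrying the move list in each queue entry
--     instead of parent pointers plus a reconstruction pass."""
--     for s in (start, end):
--         if not isinstance(s, str) or not s or any(c not in {'0', '1'} for c in s):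
--             raise ValueError("State must be a non-empty binary string")
--     if len(start) != len(end):
--         raise ValueError("States must be the same length")
--
--     if start == end:
--         return []
--     forb = forbidden or set()
--     if start in forb:
--         return None
--
--     q = deque([(start, [])])
--     visited = {start}
--     while q:
--         cur, moves = q.popleft()
--         for i in range(len(cur)):
--             new = '1' if cur[i] == '0' else '0'
--             ns = cur[:i] + new + cur[i + 1:]
--             if ns in forb or ns in visited:
--                 continue
--             step = moves + [(i, cur[i], new)]
--             if ns == end:
--                 return step
--             visited.add(ns)
--             q.append((ns, step))
--     return None
-- ===== Notes on version B (the rewrite author's own statement) =====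
-- stated objective: simpler
-- what changed: Each BFS queue entry carries its accumulated move list, so the parents dictionary and the whole backward _reconstructMoves pass (and the _neighbors generator) are removed; the answer is returned directly when the goal neighbor is generated.
import Mathlib
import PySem

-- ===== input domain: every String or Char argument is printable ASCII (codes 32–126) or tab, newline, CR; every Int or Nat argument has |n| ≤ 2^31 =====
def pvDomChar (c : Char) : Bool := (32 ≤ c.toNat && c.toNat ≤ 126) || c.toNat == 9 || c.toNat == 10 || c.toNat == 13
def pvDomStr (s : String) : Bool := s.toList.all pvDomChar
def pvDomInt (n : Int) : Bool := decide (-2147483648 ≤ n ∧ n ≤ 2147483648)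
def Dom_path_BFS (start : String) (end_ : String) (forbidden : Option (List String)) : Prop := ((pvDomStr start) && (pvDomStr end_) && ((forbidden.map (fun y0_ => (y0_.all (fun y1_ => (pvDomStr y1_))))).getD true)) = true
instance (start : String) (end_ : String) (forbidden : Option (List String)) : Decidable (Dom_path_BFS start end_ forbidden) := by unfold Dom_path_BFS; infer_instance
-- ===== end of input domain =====

-- B replaces A's parents dictionary + backward _reconstructMoves pass by carrying the move list in each
-- queue entry (objective: simpler); the BFS order itself is unchanged. Both while-loops are ported with
-- the same fuel 2^len(start)+1, which exceeds the number of pops (at most one per distinct state).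

-- ===== PORT A =====

-- _neighbors: all 1-bit-flip neighbors of `cur` not in `fb`, in index order (materialized: the
-- generator is pure, so producing the list up front is observationally identical).
def pvNeighborsA (cur : String) (fb : List String) : List (String × (Int × String × String)) :=
  (List.range cur.toList.length).filterMap (fun i =>
    let c := cur.toList.getD i ' '
    let f := if c = '0' then '1' else '0'
    let ns := String.ofList (cur.toList.take i ++ f :: cur.toList.drop (i + 1))
    if fb.contains ns then none else some (ns, ((i : Int), String.ofList [c], String.ofList [f])))

-- _reconstructMoves: follow parent pointers from `cur`, then reverse; fuel (= dict size at the call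
-- site) only makes the `while True` structurally recursive and is never exhausted in actual use.
def pvRecon (parents : PySem.Dict String (Option String × Option (Int × String × String))) :
    Nat → String → List (Int × String × String) → List (Int × String × String)
  | 0, _, moves => moves.reverse
  | f + 1, cur, moves =>
    match parents.get? cur with
    | some (some par, some mv) => pvRecon parents f par (moves ++ [mv])
    | _ => moves.reverse

-- the body of A's `for ns, mv in _neighbors(cur, forbidden)` loop (may return early)
def pvInnerA (end_ : String) (cur : String) :
    List (String × (Int × String × String)) → List String →
    PySem.Dict String (Option String × Option (Int × String × String)) → List String →
    Sum (List (Int × String × String))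
        (List String × PySem.Dict String (Option String × Option (Int × String × String)) × List String)
  | [], q, parents, visited => .inr (q, parents, visited)
  | (ns, mv) :: rest, q, parents, visited =>
    if PySem.Set.contains visited ns then pvInnerA end_ cur rest q parents visited
    else
      let parents' := parents.insert ns (some cur, some mv)
      if ns = end_ then .inl (pvRecon parents' (PySem.Dict.size parents') end_ [])
      else pvInnerA end_ cur rest (q ++ [ns]) parents' (PySem.Set.add visited ns)

-- A's `while q` loop
def pvLoopA (end_ : String) (fb : List String) :
    Nat → List String → PySem.Dict String (Option String × Option (Int × String × String)) →
    List String → Option (List (Int × String × String))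
  | 0, _, _, _ => none
  | _ + 1, [], _, _ => none
  | f + 1, cur :: q, parents, visited =>
    match pvInnerA end_ cur (pvNeighborsA cur fb) q parents visited with
    | .inl r => some r
    | .inr (q', parents', visited') => pvLoopA end_ fb f q' parents' visited'

-- path_BFS (A). The _ensureBinaryState/_sameLength validation raises outside Pre_path_BFS, where
-- nothing is claimed; `forbidden = None` becomes the empty list, with identical membership tests.
def path_BFS (start : String) (end_ : String) (forbidden : Option (List String)) :
    Option (List (Int × String × String)) :=
  if start = end_ then some []
  else if (forbidden.getD []).contains start then none
  else
    pvLoopA end_ (forbidden.getD []) (2 ^ start.toList.length + 1) [start]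
      (PySem.Dict.insert PySem.Dict.empty start (none, none))
      (PySem.Set.add PySem.Set.empty start)

-- ===== PORT B =====

-- the body of B's `for i in range(len(cur))` loop: neighbors computed inline, path carried in `moves`
def pvInnerB (end_ : String) (fb : List String) (cs : List Char) (moves : List (Int × String × String)) :
    List Nat → List (String × List (Int × String × String)) → List String →
    Sum (List (Int × String × String)) (List (String × List (Int × String × String)) × List String)
  | [], q, visited => .inr (q, visited)
  | i :: rest, q, visited =>
    let c := cs.getD i ' '
    let f := if c = '0' then '1' else '0'
    let ns := String.ofList (cs.take i ++ f :: cs.drop (i + 1))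
    if fb.contains ns || PySem.Set.contains visited ns then pvInnerB end_ fb cs moves rest q visited
    else
      let step := moves ++ [((i : Int), String.ofList [c], String.ofList [f])]
      if ns = end_ then .inl step
      else pvInnerB end_ fb cs moves rest (q ++ [(ns, step)]) (PySem.Set.add visited ns)

-- B's `while q` loop over (state, moves) pairs
def pvLoopB (end_ : String) (fb : List String) :
    Nat → List (String × List (Int × String × String)) → List String →
    Option (List (Int × String × String))
  | 0, _, _ => none
  | _ + 1, [], _ => none
  | f + 1, (cur, moves) :: q, visited =>
    match pvInnerB end_ fb cur.toList moves (List.range cur.toList.length) q visited with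
    | .inl r => some r
    | .inr (q', visited') => pvLoopB end_ fb f q' visited'

def path_BFS_alt (start : String) (end_ : String) (forbidden : Option (List String)) :
    Option (List (Int × String × String)) :=
  if start = end_ then some []
  else if (forbidden.getD []).contains start then none
  else
    pvLoopB end_ (forbidden.getD []) (2 ^ start.toList.length + 1) [(start, [])]
      (PySem.Set.add PySem.Set.empty start)

-- ===== PRECONDITION & SPEC =====
-- Pre_ = exactly the inputs where A returns: both states non-empty binary strings of equal length
-- (otherwise _ensureBinaryState/_sameLength raise ValueError).
def Pre_path_BFS (start : String) (end_ : String) (forbidden : Option (List String)) : Prop :=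
  start.toList ≠ [] ∧ end_.toList ≠ [] ∧
  start.toList.all (fun c => c == '0' || c == '1') = true ∧
  end_.toList.all (fun c => c == '0' || c == '1') = true ∧
  start.toList.length = end_.toList.length
instance (start : String) (end_ : String) (forbidden : Option (List String)) : Decidable (Pre_path_BFS start end_ forbidden) := by unfold Pre_path_BFS; infer_instance

def pvWitness_path_BFS : String × String × Option (List String) := ("01", "10", some ["11"])

def Spec_path_BFS (start : String) (end_ : String) (forbidden : Option (List String)) (out : Option (List (Int × String × String))) : Prop := out = path_BFS_alt start end_ forbidden
instance (start : String) (end_ : String) (forbidden : Option (List String)) (out : Option (List (Int × String × String))) : Decidable (Spec_path_BFS start end_ forbidden out) := by unfold Spec_path_BFS; infer_instance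

-- ===== CLAIM (what is proved, stated in full; the proofs are below) =====
def Claim_equal_path_BFS : Prop := ∀ (start : String) (end_ : String) (forbidden : Option (List String)), Dom_path_BFS start end_ forbidden → Pre_path_BFS start end_ forbidden → Spec_path_BFS start end_ forbidden (path_BFS start end_ forbidden)

-- ===== LEMMAS AND PROOFS =====

-- parent-pointer chain: from state s the parents dict walks to the root in d steps, spelling moves p
inductive PvChain (parents : PySem.Dict String (Option String × Option (Int × String × String))) :
    String → List (Int × String × String) → Nat → Prop
  | root {s : String} : parents.get? s = some (none, none) → PvChain parents s [] 0
  | step {s par : String} {mv : Int × String × String} {p : List (Int × String × String)} {d : Nat} :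
      parents.get? s = some (some par, some mv) → PvChain parents par p d →
      PvChain parents s (p ++ [mv]) (d + 1)

-- inserting a key not yet present does not disturb existing chains
theorem pvChain_insert {parents : PySem.Dict String (Option String × Option (Int × String × String))}
    {ns : String} {v : Option String × Option (Int × String × String)}
    {s : String} {p : List (Int × String × String)} {d : Nat}
    (hns : parents.get? ns = none) (h : PvChain parents s p d) :
    PvChain (parents.insert ns v) s p d := by
  induction h with
  | @root s hs =>
    refine PvChain.root ?_
    rw [PySem.Dict.get?_insert_of_ne _ v (by rintro rfl; rw [hns] at hs; cases hs)]
    exact hs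
  | @step s par mv p d hs hp ih =>
    refine PvChain.step ?_ ih
    rw [PySem.Dict.get?_insert_of_ne _ v (by rintro rfl; rw [hns] at hs; cases hs)]
    exact hs

-- _reconstructMoves on a chain of depth d returns the chain's move list when given fuel > d
theorem pvRecon_chain {parents : PySem.Dict String (Option String × Option (Int × String × String))}
    {s : String} {p : List (Int × String × String)} {d : Nat} (h : PvChain parents s p d) :
    ∀ (fuel : Nat) (acc : List (Int × String × String)), d < fuel →
      pvRecon parents fuel s acc = p ++ acc.reverse := by
  induction h with
  | @root s hs =>
    intro fuel acc hf
    match fuel with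
    | f + 1 => simp [pvRecon, hs]
  | @step s par mv p d hs hp ih =>
    intro fuel acc hf
    match fuel with
    | f + 1 =>
      simp only [pvRecon, hs]
      rw [ih f (acc ++ [mv]) (by omega)]
      simp

-- dict keys = visited (as sets), keys distinct
def PvKeysInv (parents : PySem.Dict String (Option String × Option (Int × String × String)))
    (visited : List String) : Prop :=
  (∀ k, k ∈ parents.keys ↔ k ∈ visited) ∧ parents.keys.Nodup

-- every queued (state, moves) pair of B is a chain of A's parents dict, of depth < dict size
def PvQInv (parents : PySem.Dict String (Option String × Option (Int × String × String)))
    (qB : List (String × List (Int × String × String))) : Prop :=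
  ∀ e ∈ qB, ∃ d, PvChain parents e.1 e.2 d ∧ d < parents.size

-- the neighbor-producing function of pvNeighborsA, named for the proofs below (definitional)
def pvNbrF (cur : String) (fb : List String) (i : Nat) : Option (String × (Int × String × String)) :=
  let c := cur.toList.getD i ' '
  let f := if c = '0' then '1' else '0'
  let ns := String.ofList (cur.toList.take i ++ f :: cur.toList.drop (i + 1))
  if fb.contains ns then none
  else some (ns, ((i : Int), String.ofList [c], String.ofList [f]))

theorem pvNeighborsA_eq (cur : String) (fb : List String) :
    pvNeighborsA cur fb = (List.range cur.toList.length).filterMap (pvNbrF cur fb) := rfl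

theorem pvInner_eq (end_ cur : String) (fb : List String) (moves : List (Int × String × String)) :
    ∀ (is : List Nat) (q : List String) (qB : List (String × List (Int × String × String)))
      (parents : PySem.Dict String (Option String × Option (Int × String × String)))
      (visited : List String) (dcur : Nat),
    qB.map Prod.fst = q →
    PvKeysInv parents visited →
    PvQInv parents qB →
    PvChain parents cur moves dcur → dcur < parents.size →
    (∃ r, pvInnerA end_ cur (is.filterMap (pvNbrF cur fb)) q parents visited = .inl r ∧
       pvInnerB end_ fb cur.toList moves is qB visited = .inl r) ∨
    (∃ q' qB' parents' visited',
       pvInnerA end_ cur (is.filterMap (pvNbrF cur fb)) q parents visited = .inr (q', parents', visited') ∧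
       pvInnerB end_ fb cur.toList moves is qB visited = .inr (qB', visited') ∧
       qB'.map Prod.fst = q' ∧ PvKeysInv parents' visited' ∧ PvQInv parents' qB') := by
  intro is
  induction is with
  | nil =>
    intro q qB parents visited dcur hmap hk hq _ _
    exact Or.inr ⟨q, qB, parents, visited, rfl, rfl, hmap, hk, hq⟩
  | cons i rest ih =>
    intro q qB parents visited dcur hmap hk hq hc hd
    set ns := String.ofList (cur.toList.take i ++
      (if cur.toList.getD i ' ' = '0' then '1' else '0') :: cur.toList.drop (i + 1)) with hns
    set mv : Int × String × String := ((i : Int), String.ofList [cur.toList.getD i ' '],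
      String.ofList [if cur.toList.getD i ' ' = '0' then '1' else '0']) with hmv
    have hfmi : pvNbrF cur fb i = if fb.contains ns then none else some (ns, mv) := rfl
    by_cases hforb : fb.contains ns = true
    · -- forbidden neighbor: both sides skip it
      have hfm : (i :: rest).filterMap (pvNbrF cur fb) = rest.filterMap (pvNbrF cur fb) := by
        rw [List.filterMap_cons, hfmi, if_pos hforb]
      have hB : pvInnerB end_ fb cur.toList moves (i :: rest) qB visited
          = pvInnerB end_ fb cur.toList moves rest qB visited := by
        show (if (fb.contains ns || PySem.Set.contains visited ns) = true then pvInnerB end_ fb cur.toList moves rest qB visited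
              else if ns = end_ then Sum.inl (moves ++ [mv])
              else pvInnerB end_ fb cur.toList moves rest (qB ++ [(ns, moves ++ [mv])]) (PySem.Set.add visited ns)) = _
        rw [if_pos (by rw [hforb]; rfl)]
      rw [hfm, hB]
      exact ih q qB parents visited dcur hmap hk hq hc hd
    · rw [Bool.not_eq_true] at hforb
      have hfm : (i :: rest).filterMap (pvNbrF cur fb)
          = (ns, mv) :: rest.filterMap (pvNbrF cur fb) := by
        rw [List.filterMap_cons, hfmi, if_neg (by rw [hforb]; exact Bool.false_ne_true)]
      rw [hfm]
      by_cases hvis : PySem.Set.contains visited ns = true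
      · -- already visited: both sides skip it
        have hA : pvInnerA end_ cur ((ns, mv) :: rest.filterMap (pvNbrF cur fb)) q parents visited
            = pvInnerA end_ cur (rest.filterMap (pvNbrF cur fb)) q parents visited := by
          show (if PySem.Set.contains visited ns = true then pvInnerA end_ cur (rest.filterMap (pvNbrF cur fb)) q parents visited
              else if ns = end_ then Sum.inl (pvRecon (parents.insert ns (some cur, some mv)) (PySem.Dict.size (parents.insert ns (some cur, some mv))) end_ [])
              else pvInnerA end_ cur (rest.filterMap (pvNbrF cur fb)) (q ++ [ns]) (parents.insert ns (some cur, some mv)) (PySem.Set.add visited ns)) = _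
          rw [if_pos hvis]
        have hB : pvInnerB end_ fb cur.toList moves (i :: rest) qB visited
            = pvInnerB end_ fb cur.toList moves rest qB visited := by
          show (if (fb.contains ns || PySem.Set.contains visited ns) = true then pvInnerB end_ fb cur.toList moves rest qB visited
              else if ns = end_ then Sum.inl (moves ++ [mv])
              else pvInnerB end_ fb cur.toList moves rest (qB ++ [(ns, moves ++ [mv])]) (PySem.Set.add visited ns)) = _
          rw [if_pos (by rw [hforb, hvis]; rfl)]
        rw [hA, hB]
        exact ih q qB parents visited dcur hmap hk hq hc hd
      · rw [Bool.not_eq_true] at hvis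
        -- new state: A records a parent pointer, B extends the carried path
        have hnsvis : ns ∉ visited := by
          intro hmem
          rw [(PySem.Set.contains_iff visited ns).mpr hmem] at hvis
          cases hvis
        have hcont : parents.contains ns = false := by
          rw [Bool.eq_false_iff]
          intro h
          exact hnsvis ((hk.1 ns).mp ((PySem.Dict.contains_iff_mem_keys parents ns).mp h))
        have hget : parents.get? ns = none :=
          (PySem.Dict.get?_eq_none_iff_contains parents ns).mpr hcont
        have hsize : (parents.insert ns (some cur, some mv)).size = parents.size + 1 := by
          rw [PySem.Dict.size_insert, hcont]
          simp
        have hchain' : PvChain (parents.insert ns (some cur, some mv)) ns (moves ++ [mv]) (dcur + 1) :=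
          PvChain.step (PySem.Dict.get?_insert_self parents ns (some cur, some mv))
            (pvChain_insert hget hc)
        by_cases hend : ns = end_
        · -- the goal state is generated: both sides return the completed path
          have hA : pvInnerA end_ cur ((ns, mv) :: rest.filterMap (pvNbrF cur fb)) q parents visited
              = Sum.inl (pvRecon (parents.insert ns (some cur, some mv)) (PySem.Dict.size (parents.insert ns (some cur, some mv))) end_ []) := by
            show (if PySem.Set.contains visited ns = true then pvInnerA end_ cur (rest.filterMap (pvNbrF cur fb)) q parents visited
              else if ns = end_ then Sum.inl (pvRecon (parents.insert ns (some cur, some mv)) (PySem.Dict.size (parents.insert ns (some cur, some mv))) end_ [])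
              else pvInnerA end_ cur (rest.filterMap (pvNbrF cur fb)) (q ++ [ns]) (parents.insert ns (some cur, some mv)) (PySem.Set.add visited ns)) = _
            rw [if_neg (by rw [hvis]; exact Bool.false_ne_true), if_pos hend]
          have hB : pvInnerB end_ fb cur.toList moves (i :: rest) qB visited
              = Sum.inl (moves ++ [mv]) := by
            show (if (fb.contains ns || PySem.Set.contains visited ns) = true then pvInnerB end_ fb cur.toList moves rest qB visited
              else if ns = end_ then Sum.inl (moves ++ [mv])
              else pvInnerB end_ fb cur.toList moves rest (qB ++ [(ns, moves ++ [mv])]) (PySem.Set.add visited ns)) = _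
            rw [if_neg (by rw [hforb, hvis]; exact Bool.false_ne_true), if_pos hend]
          refine Or.inl ⟨moves ++ [mv], ?_, hB⟩
          rw [hA, ← hend]
          rw [pvRecon_chain hchain' _ [] (by rw [hsize]; omega)]
          simp
        · -- fresh interior state: both sides enqueue it and continue
          have hA : pvInnerA end_ cur ((ns, mv) :: rest.filterMap (pvNbrF cur fb)) q parents visited
              = pvInnerA end_ cur (rest.filterMap (pvNbrF cur fb)) (q ++ [ns]) (parents.insert ns (some cur, some mv)) (PySem.Set.add visited ns) := by
            show (if PySem.Set.contains visited ns = true then pvInnerA end_ cur (rest.filterMap (pvNbrF cur fb)) q parents visited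
              else if ns = end_ then Sum.inl (pvRecon (parents.insert ns (some cur, some mv)) (PySem.Dict.size (parents.insert ns (some cur, some mv))) end_ [])
              else pvInnerA end_ cur (rest.filterMap (pvNbrF cur fb)) (q ++ [ns]) (parents.insert ns (some cur, some mv)) (PySem.Set.add visited ns)) = _
            rw [if_neg (by rw [hvis]; exact Bool.false_ne_true), if_neg hend]
          have hB : pvInnerB end_ fb cur.toList moves (i :: rest) qB visited
              = pvInnerB end_ fb cur.toList moves rest (qB ++ [(ns, moves ++ [mv])]) (PySem.Set.add visited ns) := by
            show (if (fb.contains ns || PySem.Set.contains visited ns) = true then pvInnerB end_ fb cur.toList moves rest qB visited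
              else if ns = end_ then Sum.inl (moves ++ [mv])
              else pvInnerB end_ fb cur.toList moves rest (qB ++ [(ns, moves ++ [mv])]) (PySem.Set.add visited ns)) = _
            rw [if_neg (by rw [hforb, hvis]; exact Bool.false_ne_true), if_neg hend]
          rw [hA, hB]
          refine ih (q ++ [ns]) (qB ++ [(ns, moves ++ [mv])]) _ _ dcur ?_ ?_ ?_
            (pvChain_insert hget hc) (by rw [hsize]; omega)
          · simp [hmap]
          · constructor
            · intro k
              rw [PySem.Dict.mem_keys_insert, PySem.Set.mem_add]
              rw [hk.1 k]
              tauto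
            · exact PySem.Dict.nodup_keys_insert _ _ _ hk.2
          · intro e he
            rw [List.mem_append] at he
            rcases he with he | he
            · obtain ⟨d, hch, hdlt⟩ := hq e he
              exact ⟨d, pvChain_insert hget hch, by rw [hsize]; omega⟩
            · simp only [List.mem_singleton] at he
              subst he
              exact ⟨dcur + 1, hchain', by rw [hsize]; omega⟩

theorem pvLoop_eq (end_ : String) (fb : List String) :
    ∀ (fuel : Nat) (qA : List String) (qB : List (String × List (Int × String × String)))
      (parents : PySem.Dict String (Option String × Option (Int × String × String)))
      (visited : List String),
    qB.map Prod.fst = qA → PvKeysInv parents visited → PvQInv parents qB →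
    pvLoopA end_ fb fuel qA parents visited = pvLoopB end_ fb fuel qB visited := by
  intro fuel
  induction fuel with
  | zero => intro qA qB parents visited _ _ _; rfl
  | succ f ih =>
    intro qA qB parents visited hmap hk hq
    match qB, hmap with
    | [], hmap =>
      have h : qA = [] := by simpa using hmap.symm
      subst h
      rfl
    | (cur, moves) :: qB', hmap =>
      have hqA : qA = cur :: qB'.map Prod.fst := by simpa using hmap.symm
      subst hqA
      simp only [pvLoopA, pvLoopB, pvNeighborsA_eq]
      obtain ⟨dcur, hc, hd⟩ := hq (cur, moves) List.mem_cons_self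
      have hq' : PvQInv parents qB' := fun e he => hq e (List.mem_cons_of_mem _ he)
      rcases pvInner_eq end_ cur fb moves (List.range cur.toList.length)
          (qB'.map Prod.fst) qB' parents visited dcur rfl hk hq' hc hd with
        ⟨r, hA, hB⟩ | ⟨q', qB'', parents', visited', hA, hB, hmap', hk', hq''⟩
      · rw [hA, hB]
      · rw [hA, hB]
        exact ih _ _ _ _ hmap' hk' hq''

-- ===== VERDICT (by name: the statement is the Claim_ definition above) =====
theorem path_BFS_spec : Claim_equal_path_BFS := by
  intro start end_ forbidden _ _
  unfold Spec_path_BFS path_BFS path_BFS_alt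
  by_cases h1 : start = end_
  · rw [if_pos h1, if_pos h1]
  · rw [if_neg h1, if_neg h1]
    by_cases h2 : (forbidden.getD []).contains start = true
    · rw [if_pos h2, if_pos h2]
    · rw [if_neg h2, if_neg h2]
      refine pvLoop_eq _ _ _ _ _ _ _ (by simp) ?_ ?_
      · constructor
        · intro k
          rw [PySem.Dict.mem_keys_insert, PySem.Set.mem_add]
          rw [PySem.Dict.keys_empty]
          constructor
          · rintro (rfl | h)
            · right; rfl
            · cases h
          · rintro (h | rfl)
            · cases h
            · left; rfl
        · exact PySem.Dict.nodup_keys_insert _ _ _ (by rw [PySem.Dict.keys_empty]; exact List.nodup_nil)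
      · intro e he
        simp only [List.mem_singleton] at he
        subst he
        refine ⟨0, PvChain.root (PySem.Dict.get?_insert_self _ _ _), ?_⟩
        rw [PySem.Dict.size_insert]
        simp [PySem.Dict.contains_empty, PySem.Dict.size_empty]
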